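-- pv_equiv track=rewrite | github.com/jemtca/CodingBat | Python/List-2/post4.py | post4
-- ===== SOURCE A (Python) =====
-- def post4(nums):
--     new_list = []
--     found = False
--
--     i = len(nums) - 1
--     while (i >= 0 and not found):
--         if nums[i] == 4:
--             j = i + 1
--             while (j < len(nums)):
--                 new_list.append(nums[j])
--                 j += 1
--             found = True
--         i -= 1
--
--
--     return new_list
-- ===== SOURCE B (Python) =====
-- def post4(nums):
--     last = -1
--     for i, x in enumerate(nums):
--         if x == 4:
--             last = i
--     if last == -1:
--         return []
--     return nums[last + 1:]
-- ===== Notes on version B (the rewrite author's own statement) =====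
-- stated objective: simpler
-- what changed: Single forward pass with enumerate records the index of the last 4, then one slice copies the tail, replacing A's backward index scan with an inner Python-level element-copy loop.
import Mathlib
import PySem

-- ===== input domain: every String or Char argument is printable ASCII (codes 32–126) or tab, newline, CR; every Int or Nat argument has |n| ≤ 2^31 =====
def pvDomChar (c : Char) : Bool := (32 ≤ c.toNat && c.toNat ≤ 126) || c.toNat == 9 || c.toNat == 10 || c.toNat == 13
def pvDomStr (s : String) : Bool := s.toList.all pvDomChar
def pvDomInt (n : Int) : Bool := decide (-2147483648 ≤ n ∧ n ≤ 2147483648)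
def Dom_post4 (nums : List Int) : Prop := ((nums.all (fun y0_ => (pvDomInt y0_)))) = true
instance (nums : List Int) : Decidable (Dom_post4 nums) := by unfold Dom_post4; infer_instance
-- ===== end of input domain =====

-- B replaces A's backward scan + inner copy loop with one forward pass recording the last index of 4, then a slice (same asymptotic cost).

-- ===== PORT A =====
-- inner while: copy nums[j], nums[j+1], … to the result
def post4Copy (nums : List Int) (j : Nat) : List Int :=
  if h : j < nums.length then nums[j] :: post4Copy nums (j + 1) else []
termination_by nums.length - j

-- outer while: i runs k-1, k-2, …, 0 until a 4 is found (k = number of indices still to try)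
def post4Loop (nums : List Int) : Nat → List Int
  | 0 => []
  | k + 1 => if nums.getD k 0 == 4 then post4Copy nums (k + 1) else post4Loop nums k

def post4 (nums : List Int) : List Int := post4Loop nums nums.length

-- ===== PORT B =====
def post4_alt (nums : List Int) : List Int :=
  let last : Int := (PySem.List.enumerate nums 0).foldl
    (fun acc p => if p.2 == 4 then p.1 else acc) (-1)
  if last == -1 then [] else PySem.List.slice nums (some (last + 1)) none

-- ===== PRECONDITION & SPEC =====
def Spec_post4 (nums : List Int) (out : List Int) : Prop := out = post4_alt nums
instance (nums : List Int) (out : List Int) : Decidable (Spec_post4 nums out) := by unfold Spec_post4; infer_instance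

-- ===== CLAIM (what is proved, stated in full; the proofs are below) =====
def Claim_equal_post4 : Prop := ∀ (nums : List Int), Dom_post4 nums → Spec_post4 nums (post4 nums)

-- ===== LEMMAS AND PROOFS =====

-- index of the last 4, structurally
def lastIdx4 : List Int → Option Nat
  | [] => none
  | x :: xs =>
    match lastIdx4 xs with
    | some i => some (i + 1)
    | none => if x == 4 then some 0 else none

lemma post4Copy_eq_drop (nums : List Int) (j : Nat) : post4Copy nums j = nums.drop j := by
  rw [post4Copy]
  split
  · next h =>
    rw [post4Copy_eq_drop nums (j + 1), List.drop_eq_getElem_cons h]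
  · next h => rw [List.drop_eq_nil_of_le (by omega)]
termination_by nums.length - j

-- counting-down search below k, mirroring post4Loop's branch
def last4below (nums : List Int) : Nat → Option Nat
  | 0 => none
  | k + 1 => if nums.getD k 0 == 4 then some k else last4below nums k

lemma post4Loop_eq (nums : List Int) (k : Nat) :
    post4Loop nums k = match last4below nums k with
      | none => []
      | some i => post4Copy nums (i + 1) := by
  induction k with
  | zero => rfl
  | succ k ih =>
    simp only [post4Loop, last4below]
    split <;> simp [ih]

lemma last4below_cons (x : Int) (xs : List Int) (k : Nat) :
    last4below (x :: xs) (k + 1) =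
      match last4below xs k with
      | some i => some (i + 1)
      | none => if x == 4 then some 0 else none := by
  induction k with
  | zero => simp [last4below]
  | succ k ih =>
    rw [show last4below (x :: xs) (k + 1 + 1)
          = if (x :: xs).getD (k + 1) 0 == 4 then some (k + 1) else last4below (x :: xs) (k + 1)
        from rfl,
        List.getD_cons_succ, ih,
        show last4below xs (k + 1)
          = if xs.getD k 0 == 4 then some k else last4below xs k from rfl]
    by_cases h : (xs.getD k 0 == 4) = true
    · rw [if_pos h, if_pos h]
    · rw [if_neg h, if_neg h]

lemma last4below_eq_lastIdx4 (nums : List Int) :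
    last4below nums nums.length = lastIdx4 nums := by
  induction nums with
  | nil => rfl
  | cons x xs ih =>
    rw [List.length_cons, last4below_cons, ih, lastIdx4]

lemma foldl_enumerate_last (xs : List Int) (s acc : Int) :
    (PySem.List.enumerate xs s).foldl (fun acc p => if p.2 == 4 then p.1 else acc) acc =
      match lastIdx4 xs with
      | some i => s + i
      | none => acc := by
  induction xs generalizing s acc with
  | nil => simp [PySem.List.enumerate_nil, lastIdx4]
  | cons x xs ih =>
    rw [PySem.List.enumerate_cons, List.foldl_cons, ih]
    simp only [lastIdx4]
    cases h : lastIdx4 xs with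
    | some i => push_cast; ring_nf
    | none => by_cases hx : x == 4 <;> simp [hx]

-- ===== VERDICT (by name: the statement is the Claim_ definition above) =====
theorem post4_spec : Claim_equal_post4 := by
  intro nums _
  unfold Spec_post4 post4 post4_alt
  rw [post4Loop_eq, last4below_eq_lastIdx4, foldl_enumerate_last]
  cases h : lastIdx4 nums with
  | none => simp
  | some i =>
    have h1 : ((0 : Int) + i == -1) = false := by rw [beq_eq_false_iff_ne]; omega
    have h2 : (0 : Int) + (i : Int) + 1 = ((i + 1 : Nat) : Int) := by push_cast; ring
    dsimp only
    rw [h1, h2, PySem.List.slice_from_natCast, post4Copy_eq_drop]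
    simp
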